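-- pv_equiv track=rewrite | github.com/Bien-Angelo/CodeWars_Solutions | Python/WhichAreIn.py | in_array
-- ===== SOURCE A (Python) =====
-- def in_array(array1, array2):
--     r = []
--     for sS in array1:
--         for i in array2:
--             S = str(i)
--             if sS in S and sS not in r:
--                 r.append(sS)
--                 break
--     return sorted(r)
-- ===== SOURCE B (Python) =====
-- def in_array(array1, array2):
--     # Build a substring index once over array2, then answer all queries by set lookup.
--     subs = set()
--     for i in array2:
--         S = str(i)
--         n = len(S)
--         for a in range(n + 1):
--             for b in range(a, n + 1):
--                 subs.add(S[a:b])
--     return sorted({s for s in array1 if s in subs})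
-- ===== Notes on version B (the rewrite author's own statement) =====
-- stated objective: faster
-- what changed: Instead of scanning array2 with a substring test for every query string (with a break and list-membership dedup), B precomputes the set of all contiguous substrings of the array2 strings once and then answers each array1 query by a single O(1) set lookup, deduplicating via a set comprehension.
import Mathlib
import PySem

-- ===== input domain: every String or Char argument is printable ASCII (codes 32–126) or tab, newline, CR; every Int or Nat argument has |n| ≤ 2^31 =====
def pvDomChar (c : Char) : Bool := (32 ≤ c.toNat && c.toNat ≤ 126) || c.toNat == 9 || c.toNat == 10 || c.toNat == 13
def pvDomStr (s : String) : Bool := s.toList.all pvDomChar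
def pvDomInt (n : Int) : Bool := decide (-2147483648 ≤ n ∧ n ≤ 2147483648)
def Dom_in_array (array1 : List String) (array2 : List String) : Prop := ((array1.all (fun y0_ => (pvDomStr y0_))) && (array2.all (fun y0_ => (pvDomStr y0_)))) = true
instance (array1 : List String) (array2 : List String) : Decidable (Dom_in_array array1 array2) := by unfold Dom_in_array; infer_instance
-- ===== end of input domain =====

-- B replaces A's per-query scan of array2 (and its list-membership dedup) by a precomputed set of
-- all substrings of array2's strings, answering each array1 query by one set lookup (measured faster
-- in a timing run on the generated input family).

-- ===== PORT A =====
-- inner 'for i in array2: S = str(i); if sS in S and sS not in r: r.append(sS); break'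
-- (str(i) on a string is the string itself)
def inArrayScan (sS : String) (r : List String) : List String → List String
  | [] => r
  | i :: rest =>
      let S := i
      if PySem.Str.isIn sS S && !(r.contains sS) then r ++ [sS]
      else inArrayScan sS r rest

def in_array (array1 : List String) (array2 : List String) : List String :=
  PySem.List.sorted (array1.foldl (fun r sS => inArrayScan sS r array2) []) (fun x => x) false

-- ===== PORT B =====
-- 'for a in range(n+1): for b in range(a, n+1): subs.add(S[a:b])'  for one S
def addSubs (subs : List String) (S : String) : List String :=
  (PySem.List.pyRange 0 (PySem.Str.len S + 1) 1).foldl (fun subs a =>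
    (PySem.List.pyRange a (PySem.Str.len S + 1) 1).foldl (fun subs b =>
      PySem.Set.add subs (PySem.Str.slice S (some a) (some b))) subs) subs

def in_array_alt (array1 : List String) (array2 : List String) : List String :=
  let subs := array2.foldl addSubs PySem.Set.empty
  PySem.List.sorted
    (PySem.Set.ofList (array1.filter (fun s => PySem.Set.contains subs s)))
    (fun x => x) false

-- ===== PRECONDITION & SPEC =====
def Spec_in_array (array1 : List String) (array2 : List String) (out : List String) : Prop := out = in_array_alt array1 array2
instance (array1 : List String) (array2 : List String) (out : List String) : Decidable (Spec_in_array array1 array2 out) := by unfold Spec_in_array; infer_instance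

-- ===== CLAIM (what is proved, stated in full; the proofs are below) =====
def Claim_equal_in_array : Prop := ∀ (array1 : List String) (array2 : List String), Dom_in_array array1 array2 → Spec_in_array array1 array2 (in_array array1 array2)

-- ===== LEMMAS AND PROOFS =====

-- A's inner scan returns r ++ [sS] iff some element of l contains sS and sS is not yet in r.
theorem inArrayScan_eq (sS : String) (r : List String) (l : List String) :
    inArrayScan sS r l =
      if l.any (fun S => PySem.Str.isIn sS S) && !(r.contains sS) then r ++ [sS] else r := by
  induction l with
  | nil => simp [inArrayScan]
  | cons i rest ih =>
      simp only [inArrayScan]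
      rw [ih, List.any_cons]
      cases h : PySem.Str.isIn sS i <;> cases hr : r.contains sS <;>
        cases ha : rest.any (fun S => PySem.Str.isIn sS S) <;> simp

-- A's outer loop is a filtered set-update.
theorem foldl_scan_eq_update (array2 : List String) (xs : List String) (r : List String) :
    xs.foldl (fun r sS => inArrayScan sS r array2) r =
      PySem.Set.update r (xs.filter (fun s => array2.any (fun S => PySem.Str.isIn s S))) := by
  induction xs generalizing r with
  | nil => simp [PySem.Set.update_nil]
  | cons x xs ih =>
      rw [List.foldl_cons, inArrayScan_eq, ih, List.filter_cons]
      cases h : (array2.any fun S => PySem.Str.isIn x S) with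
      | false => cases hr : r.contains x <;> simp
      | true =>
          cases hr : r.contains x with
          | false =>
              rw [if_pos (by decide), if_pos rfl, PySem.Set.update_cons,
                  PySem.Set.add_of_not_mem (by simpa using hr)]
          | true =>
              rw [if_neg (by decide), if_pos rfl, PySem.Set.update_cons,
                  PySem.Set.add_of_mem (by simpa using hr)]

-- membership through a fold whose step satisfies a membership characterisation
theorem mem_foldl_step {a b : Type} (g : List a -> b -> List a) (Q : b -> a -> Prop)
    (hg : forall s x y, y ∈ g s x ↔ y ∈ s ∨ Q x y) :
    forall (l : List b) (s : List a) (y : a), y ∈ l.foldl g s ↔ y ∈ s ∨ ∃ x ∈ l, Q x y := by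
  intro l
  induction l with
  | nil => simp
  | cons x l ih =>
      intro s y
      simp only [List.foldl_cons, ih, hg, List.mem_cons]
      constructor
      · rintro ((h | h) | ⟨c, hc, h⟩)
        · exact Or.inl h
        · exact Or.inr ⟨x, Or.inl rfl, h⟩
        · exact Or.inr ⟨c, Or.inr hc, h⟩
      · rintro (h | ⟨c, (rfl | hc), h⟩)
        · exact Or.inl (Or.inl h)
        · exact Or.inl (Or.inr h)
        · exact Or.inr ⟨c, hc, h⟩

-- the inner b-fold of addSubs: plain adds of slices
theorem mem_inner_fold (S : String) (a : Int) (s : List String) (y : String) :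
    y ∈ (PySem.List.pyRange a (PySem.Str.len S + 1) 1).foldl
          (fun subs b => PySem.Set.add subs (PySem.Str.slice S (some a) (some b))) s ↔
      y ∈ s ∨ ∃ b ∈ PySem.List.pyRange a (PySem.Str.len S + 1) 1, y = PySem.Str.slice S (some a) (some b) := by
  apply PySem.Set.mem_foldl_add

-- the slices S[a:b] with a in range(len(S)+1), b in range(a, len(S)+1) are exactly the infixes of S
theorem slices_iff_infix (S : String) (y : String) :
    (∃ a ∈ PySem.List.pyRange 0 (PySem.Str.len S + 1) 1,
       ∃ b ∈ PySem.List.pyRange a (PySem.Str.len S + 1) 1,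
         y = PySem.Str.slice S (some a) (some b)) ↔ y.toList <:+: S.toList := by
  constructor
  · rintro ⟨a, ha, b, hb, rfl⟩
    have hsl : (PySem.Str.slice S (some a) (some b)).toList
        = (S.toList.drop a.toNat).take (b.toNat - a.toNat) := by
      rw [PySem.List.mem_pyRange_one] at ha hb
      rw [PySem.Str.toList_slice, PySem.Chars.slice_eq_listSlice,
          PySem.List.slice_toNat] <;> omega
    rw [hsl]
    exact ((List.take_prefix _ _).isInfix).trans ((List.drop_suffix _ _).isInfix)
  · rintro ⟨pre, suf, h⟩
    have hlen : S.toList.length = pre.length + y.toList.length + suf.length := by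
      rw [← h]; simp [Nat.add_assoc]
    have hlenS : PySem.Str.len S = (S.toList.length : Int) := by simp
    refine ⟨(pre.length : Int), ?_, ((pre.length : Int) + (y.toList.length : Int)), ?_, ?_⟩
    · rw [PySem.List.mem_pyRange_one, hlenS]; omega
    · rw [PySem.List.mem_pyRange_one, hlenS]; omega
    · apply String.toList_inj.mp
      rw [PySem.Str.toList_slice, PySem.Chars.slice_eq_listSlice,
          PySem.List.slice_natCast_add, ← h, List.append_assoc, List.drop_left,
          List.take_left]

-- membership in addSubs
theorem mem_addSubs (subs : List String) (S : String) (y : String) :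
    y ∈ addSubs subs S ↔ y ∈ subs ∨ y.toList <:+: S.toList := by
  unfold addSubs
  rw [mem_foldl_step
        (Q := fun a y => ∃ b ∈ PySem.List.pyRange a (PySem.Str.len S + 1) 1,
                y = PySem.Str.slice S (some a) (some b))
        (hg := fun s a y => mem_inner_fold S a s y)]
  rw [← slices_iff_infix S y]

-- membership in B's index
theorem mem_subs (array2 : List String) (y : String) :
    y ∈ array2.foldl addSubs PySem.Set.empty ↔ ∃ t ∈ array2, y.toList <:+: t.toList := by
  rw [mem_foldl_step addSubs (fun t y => y.toList <:+: t.toList)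
        (fun s t y => mem_addSubs s t y)]
  simp [PySem.Set.empty]

-- the two filter predicates agree
theorem pred_eq (array2 : List String) (s : String) :
    (array2.any (fun S => PySem.Str.isIn s S)) =
      PySem.Set.contains (array2.foldl addSubs PySem.Set.empty) s := by
  rw [Bool.eq_iff_iff, List.any_eq_true, PySem.Set.contains_iff, mem_subs]
  simp only [PySem.Str.isIn_iff_infix]

-- ===== VERDICT (by name: the statement is the Claim_ definition above) =====
theorem in_array_spec : Claim_equal_in_array := by
  intro array1 array2 _
  unfold Spec_in_array in_array in_array_alt
  rw [foldl_scan_eq_update, PySem.Set.update_nil_left]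
  congr 2
  apply List.filter_congr
  intro x _
  exact pred_eq array2 x
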